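-- pv_equiv track=rewrite | github.com/emphity1/tesi-laurea | src/experiments/create_blocks.py | generate_increasing_sequences_with_max_repeats
-- ===== SOURCE A (Python) =====
-- import itertools
--
-- def generate_increasing_sequences_with_max_repeats(param_list, num_blocks, max_repeats):
--     sequences = []
--     for seq in itertools.combinations_with_replacement(param_list, num_blocks):
--         if all(seq[i] <= seq[i+1] for i in range(len(seq)-1)):
--             counts = {}
--             for val in seq:
--                 counts[val] = counts.get(val, 0) + 1
--             if all(count <= max_repeats for count in counts.values()):
--                 sequences.append(list(seq))
--     return sequences
-- ===== SOURCE B (Python) =====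
-- def generate_increasing_sequences_with_max_repeats(param_list, num_blocks, max_repeats):
--     # Backtracking over list positions: at each position choose how many copies of that
--     # value to take (largest first, matching the lexicographic order of
--     # combinations_with_replacement), pruning runs that would break the non-decreasing
--     # order or push a value's count past max_repeats.
--     def extend(suffix, prev, counts, remaining):
--         out = []
--         for j in range(len(suffix)):
--             v = suffix[j]
--             if prev is not None and v < prev:
--                 continue
--             cap = max_repeats - counts.get(v, 0)
--             if cap > remaining:
--                 cap = remaining
--             for m in range(cap, 0, -1):
--                 if m == remaining:
--                     out.append([v] * m)
--                 else:
--                     counts[v] = counts.get(v, 0) + m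
--                     for tail in extend(suffix[j + 1:], v, counts, remaining - m):
--                         out.append([v] * m + tail)
--                     counts[v] -= m
--         return out
--     if num_blocks == 0:
--         return [[]]
--     return extend(param_list, None, {}, num_blocks)
-- ===== Notes on version B (the rewrite author's own statement) =====
-- stated objective: alternative
-- what changed: A enumerates every combination_with_replacement and filters each candidate afterwards; B is a run-length backtracking generator over the list positions that prunes a whole subtree as soon as the next value would break the non-decreasing order or push a value's count past max_repeats, emitting only valid sequences in the same order.
import Mathlib
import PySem

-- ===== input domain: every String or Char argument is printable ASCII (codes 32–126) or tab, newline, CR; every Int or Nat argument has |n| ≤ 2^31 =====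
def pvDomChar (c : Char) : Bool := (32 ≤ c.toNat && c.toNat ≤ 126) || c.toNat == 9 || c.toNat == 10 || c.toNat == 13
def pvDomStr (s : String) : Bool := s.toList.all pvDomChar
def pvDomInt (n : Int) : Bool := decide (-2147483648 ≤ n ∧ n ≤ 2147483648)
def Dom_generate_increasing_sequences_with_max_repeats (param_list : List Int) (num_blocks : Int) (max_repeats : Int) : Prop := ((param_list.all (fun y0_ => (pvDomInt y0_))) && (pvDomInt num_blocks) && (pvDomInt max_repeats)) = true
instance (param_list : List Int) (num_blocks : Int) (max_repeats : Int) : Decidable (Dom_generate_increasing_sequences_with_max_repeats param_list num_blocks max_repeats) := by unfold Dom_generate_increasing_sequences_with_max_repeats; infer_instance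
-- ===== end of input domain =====

-- B replaces A's generate-all-then-filter over combinations_with_replacement by a pruned
-- run-length backtracking enumeration (same output values, same order); objective: alternative
-- (a genuinely different enumeration strategy; the output itself dominates the cost).

-- ===== PORT A =====
-- hand port of itertools.combinations_with_replacement(xs, r) (list form, CPython's
-- index-lexicographic order; exact on lists): tuples starting at the current index first,
-- then tuples starting at later indices.
def pvCWR {α : Type} : List α → Nat → List (List α)
  | _, 0 => [[]]
  | [], _ + 1 => []
  | x :: rest, r + 1 => (pvCWR (x :: rest) r).map (x :: ·) ++ pvCWR rest (r + 1)
termination_by xs r => (r, xs.length)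

def generate_increasing_sequences_with_max_repeats (param_list : List Int) (num_blocks : Int) (max_repeats : Int) : List (List Int) :=
  (pvCWR param_list num_blocks.toNat).foldl (fun sequences seq =>
    if (PySem.List.pyRange 0 (PySem.List.len seq - 1) 1).all
        (fun i => decide (PySem.List.pyGetD seq i 0 ≤ PySem.List.pyGetD seq (i + 1) 0)) then
      let counts := seq.foldl (fun c v => c.insert v (c.getD v 0 + 1)) (PySem.Dict.empty : PySem.Dict Int Int)
      if counts.values.all (fun count => decide (count ≤ max_repeats)) then sequences ++ [seq]
      else sequences
    else sequences) []

-- ===== PORT B =====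
-- pvBExtend = B's `extend(suffix, prev, counts, remaining)`: the `for j in range(len(suffix))`
-- loop is the recursion over the suffix (suffix[j+1:] being the next tail); the inner
-- `for m in range(cap, 0, -1)` loop is the foldl over PySem.List.pyRange cap 0 (-1);
-- `[v] * m` is PySem.List.pyRepeat [v] m.
def pvBExtend (maxR : Int) : List Int → Option Int → PySem.Dict Int Int → Int → List (List Int)
  | [], _, _, _ => []
  | v :: rest, prev, counts, remaining =>
    (if (match prev with | some p => decide (v < p) | none => false) then
      []
    else
      let cap0 := maxR - counts.getD v 0
      let cap := if remaining < cap0 then remaining else cap0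
      (PySem.List.pyRange cap 0 (-1)).foldl (fun out m =>
        if m = remaining then
          out ++ [PySem.List.pyRepeat [v] m]
        else
          out ++ (pvBExtend maxR rest (some v)
            (counts.insert v (counts.getD v 0 + m)) (remaining - m)).map
              (fun tail => PySem.List.pyRepeat [v] m ++ tail)) [])
    ++ pvBExtend maxR rest prev counts remaining

def generate_increasing_sequences_with_max_repeats_alt (param_list : List Int) (num_blocks : Int) (max_repeats : Int) : List (List Int) :=
  if num_blocks = 0 then [[]]
  else pvBExtend max_repeats param_list none PySem.Dict.empty num_blocks

-- ===== PRECONDITION & SPEC =====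
-- Python A raises ValueError (negative r in combinations_with_replacement) when num_blocks < 0.
def Pre_generate_increasing_sequences_with_max_repeats (param_list : List Int) (num_blocks : Int) (max_repeats : Int) : Prop := 0 ≤ num_blocks
instance (param_list : List Int) (num_blocks : Int) (max_repeats : Int) : Decidable (Pre_generate_increasing_sequences_with_max_repeats param_list num_blocks max_repeats) := by unfold Pre_generate_increasing_sequences_with_max_repeats; infer_instance

def pvWitness_generate_increasing_sequences_with_max_repeats : List Int × Int × Int := ([1, 2], 2, 1)

def Spec_generate_increasing_sequences_with_max_repeats (param_list : List Int) (num_blocks : Int) (max_repeats : Int) (out : List (List Int)) : Prop := out = generate_increasing_sequences_with_max_repeats_alt param_list num_blocks max_repeats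
instance (param_list : List Int) (num_blocks : Int) (max_repeats : Int) (out : List (List Int)) : Decidable (Spec_generate_increasing_sequences_with_max_repeats param_list num_blocks max_repeats out) := by unfold Spec_generate_increasing_sequences_with_max_repeats; infer_instance

-- ===== CLAIM (what is proved, stated in full; the proofs are below) =====
def Claim_equal_generate_increasing_sequences_with_max_repeats : Prop := ∀ (param_list : List Int) (num_blocks : Int) (max_repeats : Int), Dom_generate_increasing_sequences_with_max_repeats param_list num_blocks max_repeats → Pre_generate_increasing_sequences_with_max_repeats param_list num_blocks max_repeats → Spec_generate_increasing_sequences_with_max_repeats param_list num_blocks max_repeats (generate_increasing_sequences_with_max_repeats param_list num_blocks max_repeats)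


-- ===== LEMMAS AND PROOFS =====

-- named equations of pvCWR
lemma pvCWR_zero (xs : List Int) : pvCWR xs 0 = [[]] := by rw [pvCWR]
lemma pvCWR_nil_succ (r : Nat) : pvCWR ([] : List Int) (r + 1) = [] := by rw [pvCWR]
lemma pvCWR_cons_succ (v : Int) (rest : List Int) (r : Nat) :
    pvCWR (v :: rest) (r + 1) = (pvCWR (v :: rest) r).map (v :: ·) ++ pvCWR rest (r + 1) := by
  rw [pvCWR]

-- non-decreasing check with an optional lower bound (B's `prev`)
def pvND : Option Int → List Int → Bool
  | _, [] => true
  | none, x :: t => pvND (some x) t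
  | some p, x :: t => decide (p ≤ x) && pvND (some x) t

-- incremental multiplicity check (B's counts pruning, one element at a time)
def pvCnt (maxR : Int) : PySem.Dict Int Int → List Int → Bool
  | _, [] => true
  | d, x :: t => decide (d.getD x 0 + 1 ≤ maxR) && pvCnt maxR (d.insert x (d.getD x 0 + 1)) t

-- "prev is None or prev <= v"
def pvPrevOK : Option Int → Int → Bool
  | none, _ => true
  | some p, v => decide (p ≤ v)

lemma pvND_cons (prev : Option Int) (v : Int) (l : List Int) :
    pvND prev (v :: l) = (pvPrevOK prev v && pvND (some v) l) := by
  cases prev <;> rw [pvND] <;> simp [pvPrevOK]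

lemma pvND_rep (v : Int) : ∀ (k : Nat) (prev : Option Int) (tail : List Int),
    pvND prev (List.replicate (k + 1) v ++ tail) = (pvPrevOK prev v && pvND (some v) tail) := by
  intro k
  induction k with
  | zero => intro prev tail; rw [show List.replicate 1 v ++ tail = v :: tail by simp, pvND_cons]
  | succ k ih =>
    intro prev tail
    rw [show List.replicate (k + 2) v ++ tail = v :: (List.replicate (k + 1) v ++ tail) by
      simp [List.replicate_succ], pvND_cons, ih (some v) tail]
    simp [pvPrevOK]

lemma pvCnt_rep (maxR v : Int) : ∀ (k : Nat) (d : PySem.Dict Int Int) (tail : List Int),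
    pvCnt maxR d (List.replicate (k + 1) v ++ tail)
      = (decide (d.getD v 0 + ((k + 1 : Nat) : Int) ≤ maxR)
          && pvCnt maxR (d.insert v (d.getD v 0 + ((k + 1 : Nat) : Int))) tail) := by
  intro k
  induction k with
  | zero =>
    intro d tail
    rw [show List.replicate 1 v ++ tail = v :: tail by simp, pvCnt]
    norm_num
  | succ k ih =>
    intro d tail
    rw [show List.replicate (k + 2) v ++ tail = v :: (List.replicate (k + 1) v ++ tail) by
      simp [List.replicate_succ], pvCnt, ih]
    rw [PySem.Dict.getD_insert_self, PySem.Dict.insert_insert_self]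
    push_cast
    rw [show d.getD v 0 + 1 + ((k : Int) + 1) = d.getD v 0 + ((k : Int) + 1 + 1) by ring]
    by_cases h : d.getD v 0 + ((k : Int) + 1 + 1) ≤ maxR
    · simp only [h, decide_true, Bool.true_and]
      simp [show d.getD v 0 + 1 ≤ maxR by omega]
    · simp [h]

lemma pvCnt_iff (maxR : Int) : ∀ (s : List Int) (d : PySem.Dict Int Int),
    pvCnt maxR d s = true ↔ ∀ v ∈ s, d.getD v 0 + (s.count v : Int) ≤ maxR := by
  have hc_self : ∀ (a : Int) (t : List Int), (((a :: t).count a : Nat) : Int) = (t.count a : Int) + 1 := by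
    intro a t; simp
  have hc_ne : ∀ (a b : Int) (t : List Int), b ≠ a → (a :: t).count b = t.count b := by
    intro a b t h; simp [Ne.symm h]
  intro s
  induction s with
  | nil => intro d; simp [pvCnt]
  | cons x t ih =>
    intro d
    rw [pvCnt, Bool.and_eq_true, decide_eq_true_eq, ih]
    constructor
    · rintro ⟨hx, hrec⟩ v hv
      rcases List.mem_cons.mp hv with rfl | hvt
      · by_cases hxt : v ∈ t
        · have := hrec v hxt
          rw [PySem.Dict.getD_insert, if_pos rfl] at this
          rw [hc_self]
          omega
        · have hz : t.count v = 0 := List.count_eq_zero.mpr hxt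
          rw [hc_self, hz]
          push_cast
          omega
      · by_cases hvx : v = x
        · subst hvx
          have := hrec v hvt
          rw [PySem.Dict.getD_insert, if_pos rfl] at this
          rw [hc_self]
          omega
        · have := hrec v hvt
          rw [PySem.Dict.getD_insert, if_neg hvx] at this
          rw [hc_ne x v t hvx]
          omega
    · intro h
      have hx := h x (List.mem_cons_self)
      rw [hc_self] at hx
      constructor
      · omega
      · intro v hvt
        rw [PySem.Dict.getD_insert]
        by_cases hvx : v = x
        · subst hvx
          rw [if_pos rfl]
          have := h v (List.mem_cons_self)
          rw [hc_self] at this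
          omega
        · rw [if_neg hvx]
          have := h v (List.mem_cons_of_mem _ hvt)
          rw [hc_ne x v t hvx] at this
          omega

-- range(cap, 0, -1) is the descending list [cap, cap-1, …, 1]
lemma pyRange_desc (cap : Int) :
    PySem.List.pyRange cap 0 (-1) = (List.range cap.toNat).map (fun k : Nat => cap - (k : Int)) := by
  by_cases h : 0 < cap
  · simp only [PySem.List.pyRange, if_neg (by norm_num : ¬((-1 : Int) = 0)),
      if_neg (by norm_num : ¬(0 : Int) < -1), if_pos h]
    rw [show ((cap - 0 + - -1 - 1) / - -1) = cap by norm_num]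
    exact List.map_congr_left (fun a _ => by ring)
  · simp [PySem.List.pyRange, h, show cap.toNat = 0 by omega]

-- the descending list [r, r-1, …, 1] of run lengths
def pvDesc (r : Nat) : List Nat := (List.range r).map (fun i => r - i)

lemma mem_pvDesc {m r : Nat} (h : m ∈ pvDesc r) : 1 ≤ m ∧ m ≤ r := by
  simp only [pvDesc, List.mem_map, List.mem_range] at h
  obtain ⟨i, hi, rfl⟩ := h
  omega

lemma pvDesc_succ (r : Nat) : pvDesc (r + 1) = (pvDesc r).map (· + 1) ++ [1] := by
  simp only [pvDesc, List.range_succ, List.map_append, List.map_map, List.map_cons, List.map_nil]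
  congr 1
  · exact List.map_congr_left (fun i hi => by
      have := List.mem_range.mp hi
      simp only [Function.comp]
      omega)
  · congr 1
    omega

-- two flatMaps over the same list agree if the functions agree on its members
lemma pvFlatMap_congr {α β : Type} {l : List α} {f g : α → List β}
    (h : ∀ a ∈ l, f a = g a) : l.flatMap f = l.flatMap g := by
  rw [List.flatMap_def, List.flatMap_def]
  exact congrArg List.flatten (List.map_congr_left h)

-- run-length decomposition of combinations_with_replacement: group the tuples by how many
-- copies of the head element they start with (r, r-1, …, 1 copies, then none)
lemma pvCWR_runs (v : Int) (rest : List Int) : ∀ (r : Nat),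
    pvCWR (v :: rest) r
      = (pvDesc r).flatMap (fun m => (pvCWR rest (r - m)).map (fun t => List.replicate m v ++ t))
          ++ pvCWR rest r := by
  intro r
  induction r with
  | zero => rw [pvCWR_zero, pvCWR_zero]; simp [pvDesc]
  | succ r ih =>
    rw [pvCWR_cons_succ, ih, List.map_append, List.map_flatMap, pvDesc_succ,
      List.flatMap_append, List.flatMap_map]
    congr 1
    congr 1
    · apply pvFlatMap_congr
      intro m _
      rw [show r + 1 - (m + 1) = r - m by omega, List.map_map]
      exact List.map_congr_left (fun t _ => by simp [List.replicate_succ])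
    · rw [List.flatMap_cons, List.flatMap_nil, List.append_nil,
        show r + 1 - 1 = r by omega]
      exact List.map_congr_left (fun t _ => by simp)

-- split the run-length list [r..1] at a cutoff c ≤ r
lemma pvDesc_split (r c : Nat) (h : c ≤ r) :
    pvDesc r = (List.range (r - c)).map (fun i => r - i) ++ pvDesc c := by
  simp only [pvDesc]
  rw [show List.range r = List.range (r - c) ++ (List.range c).map (fun i => (r - c) + i) by
    rw [← List.range_add, Nat.sub_add_cancel h], List.map_append, List.map_map]
  congr 1
  apply List.map_congr_left
  intro i hi
  have := List.mem_range.mp hi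
  simp only [Function.comp]
  omega

-- one-step unfolding of pvBExtend on a cons (the match on prev splits its equations)
lemma pvBExtend_cons (maxR v : Int) (rest : List Int) (prev : Option Int)
    (counts : PySem.Dict Int Int) (remaining : Int) :
    pvBExtend maxR (v :: rest) prev counts remaining
      = (if (match prev with | some p => decide (v < p) | none => false) then
          []
        else
          let cap0 := maxR - counts.getD v 0
          let cap := if remaining < cap0 then remaining else cap0
          (PySem.List.pyRange cap 0 (-1)).foldl (fun out m =>
            if m = remaining then
              out ++ [PySem.List.pyRepeat [v] m]
            else
              out ++ (pvBExtend maxR rest (some v)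
                (counts.insert v (counts.getD v 0 + m)) (remaining - m)).map
                  (fun tail => PySem.List.pyRepeat [v] m ++ tail)) [])
        ++ pvBExtend maxR rest prev counts remaining := by
  rcases prev with _ | p <;> rfl

-- B computes exactly the pvND/pvCnt-filtered combinations_with_replacement
lemma pvBExtend_eq (maxR : Int) : ∀ (suffix : List Int) (remaining : Int), 1 ≤ remaining →
    ∀ (prev : Option Int) (counts : PySem.Dict Int Int),
    pvBExtend maxR suffix prev counts remaining
      = (pvCWR suffix remaining.toNat).filter (fun s => pvND prev s && pvCnt maxR counts s) := by
  intro suffix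
  induction suffix with
  | nil =>
    intro remaining hrem prev counts
    obtain ⟨k, hk⟩ : ∃ k, remaining.toNat = k + 1 := ⟨remaining.toNat - 1, by omega⟩
    rw [pvBExtend.eq_1, hk, pvCWR_nil_succ]
    rfl
  | cons v rest ih =>
    intro remaining hrem prev counts
    have hrr : ((remaining.toNat : Nat) : Int) = remaining := by omega
    rw [pvBExtend_cons, pvCWR_runs v rest remaining.toNat, List.filter_append,
      List.filter_flatMap, ih remaining hrem prev counts]
    congr 1
    -- per-run block, filtered
    have hcond : (match prev with | some p => decide (v < p) | none => false)
        = !(pvPrevOK prev v) := by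
      rcases prev with _ | pw
      · rfl
      · simp only [pvPrevOK]
        by_cases h : v < pw
        · simp [h, show ¬ (pw ≤ v) by omega]
        · simp [h, show pw ≤ v by omega]
    rw [hcond]
    set P : List Int → Bool := fun s => pvND prev s && pvCnt maxR counts s with hP
    set r : Nat := remaining.toNat with hrdef
    cases hpok : pvPrevOK prev v with
    | false =>
      -- prev is not None and v < prev: the whole v-headed group dies
      rw [if_pos (show (!false) = true from rfl)]
      symm
      rw [List.flatMap_eq_nil_iff]
      intro m hm
      obtain ⟨hm1, hmr⟩ := mem_pvDesc hm
      obtain ⟨k, rfl⟩ : ∃ k, m = k + 1 := ⟨m - 1, by omega⟩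
      rw [List.filter_map, List.filter_congr (fun t _ => by
        show P (List.replicate (k + 1) v ++ t) = (fun _ => false) t
        rw [hP]
        simp only []
        rw [pvND_rep v k prev t, hpok]
        simp), List.filter_false, List.map_nil]
    | true =>
      -- prev allows v
      rw [if_neg (by simp)]
      -- name cap, turn the foldl into a flatMap over the descending range
      simp only []
      set cap : Int := if remaining < maxR - counts.getD v 0 then remaining else maxR - counts.getD v 0 with hcap
      set g : Int → List (List Int) := fun m =>
        if m = remaining then [PySem.List.pyRepeat [v] m]
        else (pvBExtend maxR rest (some v) (counts.insert v (counts.getD v 0 + m)) (remaining - m)).map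
          (fun tail => PySem.List.pyRepeat [v] m ++ tail) with hg
      rw [show (fun (out : List (List Int)) (m : Int) =>
            if m = remaining then out ++ [PySem.List.pyRepeat [v] m]
            else out ++ (pvBExtend maxR rest (some v)
              (counts.insert v (counts.getD v 0 + m)) (remaining - m)).map
                (fun tail => PySem.List.pyRepeat [v] m ++ tail))
          = (fun out m => out ++ g m) from funext fun out => funext fun m => by
            rw [hg]; simp only []; split_ifs <;> rfl]
      rw [PySem.List.foldl_append_eq_flatMap, List.nil_append, pyRange_desc, List.flatMap_map]
      -- split the run list at c = cap.toNat
      have hcapr : cap ≤ remaining := by rw [hcap]; split_ifs <;> omega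
      have hcle : cap.toNat ≤ r := by omega
      rw [pvDesc_split r cap.toNat hcle, List.flatMap_append]
      have hdead : (List.map (fun i => r - i) (List.range (r - cap.toNat))).flatMap
          (fun m => List.filter P ((pvCWR rest (r - m)).map (fun t => List.replicate m v ++ t)))
          = [] := by
        rw [List.flatMap_eq_nil_iff]
        intro m hm
        obtain ⟨i, hi, rfl⟩ : ∃ i ∈ List.range (r - cap.toNat), r - i = m := by
          simpa using List.mem_map.mp hm
        have hi' := List.mem_range.mp hi
        obtain ⟨k, hk⟩ : ∃ k, r - i = k + 1 := ⟨r - i - 1, by omega⟩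
        rw [hk, List.filter_map, List.filter_congr (fun t _ => by
          show P (List.replicate (k + 1) v ++ t) = (fun _ => false) t
          rw [hP]
          simp only []
          rw [pvND_rep v k prev t, pvCnt_rep maxR v k counts t, hpok]
          have hbig : ¬ (counts.getD v 0 + ((k + 1 : Nat) : Int) ≤ maxR) := by
            have : cap < ((k + 1 : Nat) : Int) := by push_cast; omega
            rw [hcap] at this
            split_ifs at this <;> push_cast at this ⊢ <;> omega
          push_cast at hbig
          simp [hbig]), List.filter_false, List.map_nil]
      rw [hdead, List.nil_append]
      -- on the surviving runs the two sides agree pointwise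
      simp only [pvDesc]
      rw [List.flatMap_map]
      apply pvFlatMap_congr
      intro i hi
      have hi' := List.mem_range.mp hi
      have hcpos : 0 < cap := by omega
      have hmcast : ((cap.toNat - i : Nat) : Int) = cap - (i : Int) := by omega
      obtain ⟨k, hk⟩ : ∃ k, cap.toNat - i = k + 1 := ⟨cap.toNat - i - 1, by omega⟩
      have hkcast : ((k + 1 : Nat) : Int) = cap - (i : Int) := by rw [← hmcast, hk]
      have hsmall : counts.getD v 0 + ((k + 1 : Nat) : Int) ≤ maxR := by
        rw [hkcast, hcap]
        split_ifs at hcap ⊢ <;> omega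
      rw [hk, List.filter_map, List.filter_congr (fun t _ => by
          show P (List.replicate (k + 1) v ++ t)
            = (fun t => pvND (some v) t
                && pvCnt maxR (counts.insert v (counts.getD v 0 + ((k + 1 : Nat) : Int))) t) t
          rw [hP]
          simp only []
          rw [pvND_rep v k prev t, pvCnt_rep maxR v k counts t, hpok]
          have hsmall' := hsmall
          push_cast at hsmall'
          simp [hsmall'])]
      rw [hg]
      simp only []
      rw [← hkcast]
      by_cases hlast : ((k + 1 : Nat) : Int) = remaining
      · -- the run uses up all remaining slots: the tail is empty
        rw [if_pos hlast]
        have hzero : r - (k + 1) = 0 := by omega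
        rw [hzero, pvCWR_zero]
        rw [show List.filter (fun t => pvND (some v) t
            && pvCnt maxR (counts.insert v (counts.getD v 0 + ((k + 1 : Nat) : Int))) t) [[]] = [[]] by
          rw [List.filter, pvND, pvCnt]; rfl]
        rw [List.map_cons, List.map_nil, List.append_nil,
          PySem.List.pyRepeat_singleton]
        simp
      · rw [if_neg hlast]
        rw [ih (remaining - ((k + 1 : Nat) : Int)) (by push_cast at hlast hkcast ⊢; omega)
            (some v) (counts.insert v (counts.getD v 0 + ((k + 1 : Nat) : Int)))]
        rw [show (remaining - ((k + 1 : Nat) : Int)).toNat = r - (k + 1) by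
          push_cast at hkcast ⊢; omega]
        exact List.map_congr_left (fun t _ => by
          rw [PySem.List.pyRepeat_singleton]
          simp)

-- A's per-element adjacency test, reduced to a Nat-indexed List.range form
lemma ndA_range (s : List Int) :
    ((PySem.List.pyRange 0 (PySem.List.len s - 1) 1).all
      (fun i => decide (PySem.List.pyGetD s i 0 ≤ PySem.List.pyGetD s (i + 1) 0)))
      = (List.range (s.length - 1)).all
          (fun i => decide (s.getD i 0 ≤ s.getD (i + 1) 0)) := by
  cases s with
  | nil => simp [PySem.List.pyRange]
  | cons x t =>
    rw [show PySem.List.len (x :: t) - 1 = ((t.length : Nat) : Int) by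
      simp [PySem.List.len_eq]]
    rw [PySem.List.pyRange_zero_natCast, List.all_map,
      show (x :: t).length - 1 = t.length by simp]
    apply List.all_congr rfl
    intro i
    have h1 : PySem.List.pyGetD (x :: t) ((i : Nat) : Int) 0 = (x :: t).getD i 0 :=
      PySem.List.pyGetD_natCast (x :: t) i 0
    have h2 : PySem.List.pyGetD (x :: t) (((i : Nat) : Int) + 1) 0 = (x :: t).getD (i + 1) 0 := by
      rw [show ((i : Nat) : Int) + 1 = (((i + 1 : Nat)) : Int) by push_cast; ring]
      exact PySem.List.pyGetD_natCast (x :: t) (i + 1) 0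
    simp [Function.comp, h1, h2]

-- the Nat-indexed adjacency test equals pvND none
lemma ndA_eq_pvND : ∀ (s : List Int),
    (List.range (s.length - 1)).all (fun i => decide (s.getD i 0 ≤ s.getD (i + 1) 0))
      = pvND none s := by
  intro s
  induction s with
  | nil => simp [pvND]
  | cons x t ih =>
    cases t with
    | nil => simp [pvND]
    | cons y u =>
      rw [show (x :: y :: u).length - 1 = ((y :: u).length - 1) + 1 by simp,
        List.range_succ_eq_map, List.all_cons, List.all_map,
        show pvND none (x :: y :: u) = (decide (x ≤ y) && pvND none (y :: u)) from by
          rw [show pvND none (x :: y :: u) = pvND (some x) (y :: u) from by rw [pvND],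
            show pvND none (y :: u) = pvND (some y) u from by rw [pvND]]
          rw [pvND], ← ih]
      congr 1

-- A's dict counting test equals pvCnt from the empty dict
lemma cntA_eq (maxR : Int) (s : List Int) :
    ((s.foldl (fun c v => c.insert v (c.getD v 0 + 1)) (PySem.Dict.empty : PySem.Dict Int Int)).values.all
      (fun count => decide (count ≤ maxR))) = pvCnt maxR PySem.Dict.empty s := by
  rw [PySem.Dict.foldl_insert_getD_add_one_eq_counter,
    PySem.Dict.values_eq_map_keys _ (PySem.Dict.nodup_keys_counter s) 0, List.all_map]
  have hL : ((PySem.Dict.counter s).keys.all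
      ((fun count => decide (count ≤ maxR)) ∘ fun k => (PySem.Dict.counter s).getD k 0)) = true
      ↔ ∀ v ∈ s, (s.count v : Int) ≤ maxR := by
    rw [List.all_eq_true]
    constructor
    · intro h v hv
      have hk : v ∈ (PySem.Dict.counter s).keys := by
        rw [PySem.Dict.keys_counter]
        exact (PySem.Set.mem_ofList s v).mpr hv
      have := h v hk
      simpa [Function.comp, PySem.Dict.getD_counter] using this
    · intro h v hv
      rw [PySem.Dict.keys_counter] at hv
      have := h v ((PySem.Set.mem_ofList s v).mp hv)
      simpa [Function.comp, PySem.Dict.getD_counter] using this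
  have hR : pvCnt maxR PySem.Dict.empty s = true ↔ ∀ v ∈ s, (s.count v : Int) ≤ maxR := by
    rw [pvCnt_iff]
    constructor
    · intro h v hv; have := h v hv; rw [PySem.Dict.getD_empty] at this; omega
    · intro h v hv; rw [PySem.Dict.getD_empty]; have := h v hv; omega
  rw [Bool.eq_iff_iff, hL, hR]

-- ===== VERDICT (by name: the statement is the Claim_ definition above) =====
theorem generate_increasing_sequences_with_max_repeats_spec : Claim_equal_generate_increasing_sequences_with_max_repeats := by
  intro param_list num_blocks max_repeats _hdom hpre
  unfold Spec_generate_increasing_sequences_with_max_repeats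
  unfold generate_increasing_sequences_with_max_repeats
  unfold generate_increasing_sequences_with_max_repeats_alt
  have hbody : ∀ (acc : List (List Int)) (seq : List Int),
      (if (PySem.List.pyRange 0 (PySem.List.len seq - 1) 1).all
          (fun i => decide (PySem.List.pyGetD seq i 0 ≤ PySem.List.pyGetD seq (i + 1) 0)) then
        (let counts := seq.foldl (fun c v => c.insert v (c.getD v 0 + 1)) (PySem.Dict.empty : PySem.Dict Int Int)
         if counts.values.all (fun count => decide (count ≤ max_repeats)) then acc ++ [seq] else acc)
      else acc)
      = (if (fun s => pvND none s && pvCnt max_repeats PySem.Dict.empty s) seq then acc ++ [seq] else acc) := by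
    intro acc seq
    rw [ndA_range, ndA_eq_pvND]
    by_cases h1 : pvND none seq = true
    · rw [if_pos h1]
      simp only [h1, Bool.true_and]
      rw [cntA_eq]
    · rw [if_neg h1]
      simp [h1]
  rw [PySem.List.foldl_congr_mem _ _ _ _ (fun acc seq _ => hbody acc seq)]
  rw [PySem.List.foldl_append_if_eq_filter, List.nil_append]
  by_cases hz : num_blocks = 0
  · rw [if_pos hz, hz]
    rw [show ((0 : Int)).toNat = 0 by rfl, pvCWR_zero]
    rw [List.filter, pvND, pvCnt]
    rfl
  · rw [if_neg hz, pvBExtend_eq max_repeats param_list num_blocks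
      (by unfold Pre_generate_increasing_sequences_with_max_repeats at hpre; omega)
      none PySem.Dict.empty]
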